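-- pv_equiv track=rewrite | github.com/DBids35/Advent-of-Code-2024 | d12.py | north_list_to_north_dict
-- ===== SOURCE A (Python) =====
-- def north_list_to_north_dict(north_list):
-- 	north_dict = {}
-- 	for coord in north_list:
-- 		x,y = coord
-- 		if x in north_dict.keys():
-- 			north_dict[x].append(y)
-- 		else:
-- 			north_dict[x] = [y]
-- 	return north_dict
-- ===== SOURCE B (Python) =====
-- def north_list_to_north_dict(north_list):
-- 	keys = dict.fromkeys(x for x, _ in north_list)
-- 	return {x: [y for xx, y in north_list if xx == x] for x in keys}
-- ===== Notes on version B (the rewrite author's own statement) =====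
-- stated objective: alternative
-- what changed: Replaces the single membership-checking append-or-insert pass with a two-pass decomposition: dedup the x-keys in first-occurrence order, then build each group's y-list with a filter comprehension.
import Mathlib
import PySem

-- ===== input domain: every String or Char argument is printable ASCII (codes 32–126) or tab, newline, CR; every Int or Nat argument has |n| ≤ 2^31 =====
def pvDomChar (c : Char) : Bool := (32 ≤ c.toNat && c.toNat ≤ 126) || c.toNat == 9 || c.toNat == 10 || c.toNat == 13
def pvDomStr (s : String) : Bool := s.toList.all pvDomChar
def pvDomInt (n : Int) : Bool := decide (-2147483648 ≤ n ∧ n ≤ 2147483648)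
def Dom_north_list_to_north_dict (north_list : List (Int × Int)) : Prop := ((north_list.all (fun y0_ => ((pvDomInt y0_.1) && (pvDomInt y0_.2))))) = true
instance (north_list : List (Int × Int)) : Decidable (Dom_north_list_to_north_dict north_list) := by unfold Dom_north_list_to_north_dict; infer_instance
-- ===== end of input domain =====

-- B replaces A's one-pass membership-checked append-or-insert with a two-pass dedup-then-filter decomposition (alternative, same cost).

-- ===== PORT A =====
-- one pass: if key present, append y in place; else insert a fresh singleton
def north_list_to_north_dict (north_list : List (Int × Int)) : List (Int × List Int) :=
  (north_list.foldl
    (fun d coord =>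
      if d.contains coord.1 then d.modify coord.1 [] (· ++ [coord.2])
      else d.insert coord.1 [coord.2])
    PySem.Dict.empty).items

-- ===== PORT B =====
def north_list_to_north_dict_alt (north_list : List (Int × Int)) : List (Int × List Int) :=
  (PySem.List.dedup (north_list.map (·.1))).map
    (fun x => (x, (north_list.filter (fun p => p.1 == x)).map (·.2)))

-- ===== PRECONDITION & SPEC =====
def Spec_north_list_to_north_dict (north_list : List (Int × Int)) (out : List (Int × List Int)) : Prop := out = north_list_to_north_dict_alt north_list
instance (north_list : List (Int × Int)) (out : List (Int × List Int)) : Decidable (Spec_north_list_to_north_dict north_list out) := by unfold Spec_north_list_to_north_dict; infer_instance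

-- ===== CLAIM (what is proved, stated in full; the proofs are below) =====
def Claim_equal_north_list_to_north_dict : Prop := ∀ (north_list : List (Int × Int)), Dom_north_list_to_north_dict north_list → Spec_north_list_to_north_dict north_list (north_list_to_north_dict north_list)

-- ===== LEMMAS AND PROOFS =====

-- A's branch on membership is exactly Dict.modify with default []
theorem pvStep_eq_modify (d : PySem.Dict Int (List Int)) (p : Int × Int) :
    (if d.contains p.1 then d.modify p.1 [] (· ++ [p.2]) else d.insert p.1 [p.2])
      = d.modify p.1 [] (· ++ [p.2]) := by
  by_cases h : d.contains p.1
  · simp [h]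
  · rw [PySem.Dict.modify,
        PySem.Dict.getD_of_not_contains d [] (Bool.eq_false_iff.mpr h)]
    simp [h]

theorem north_list_to_north_dict_spec : Claim_equal_north_list_to_north_dict := by
  intro l _
  unfold Spec_north_list_to_north_dict north_list_to_north_dict north_list_to_north_dict_alt
  have hfold : (l.foldl
      (fun d coord =>
        if d.contains coord.1 then d.modify coord.1 [] (· ++ [coord.2])
        else d.insert coord.1 [coord.2]) PySem.Dict.empty)
      = l.foldl (fun d p => d.modify p.1 [] (· ++ [p.2])) PySem.Dict.empty := by
    simp only [pvStep_eq_modify]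
  rw [hfold]
  set D := l.foldl (fun d p => d.modify p.1 [] (· ++ [p.2])) PySem.Dict.empty with hD
  have hkeys : D.keys = PySem.List.dedup (l.map (·.1)) := by
    rw [hD, PySem.Dict.keys_foldl_modify_key]
    simp [PySem.Set.update_nil_left]
  have hnd : D.keys.Nodup := by
    rw [hkeys]; exact PySem.List.nodup_dedup _
  rw [PySem.Dict.items_eq_map_keys D hnd ([] : List Int), hkeys]
  apply List.map_congr_left
  intro x _
  have := PySem.Dict.getD_foldl_modify_append (l := l) (d := PySem.Dict.empty) (c := x)
  simp only [← hD] at this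
  simp [this]
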